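-- pv_equiv track=rewrite | github.com/e5pe0n/algorithm-training | cracking_the_coding_interview_6th/chapter17/python/17_05_v02.py | find_longest_match
-- ===== SOURCE A (Python) =====
-- from typing import List, Tuple
--
-- def find_longest_match(deltas: List[int]) -> Tuple[int, int]:
--     m = {0: -1}
--     left, right = 0, 0
--     for i in range(len(deltas)):
--         if deltas[i] not in m:
--             m[deltas[i]] = i
--         else:
--             fst = m[deltas[i]]
--             dist = i - fst
--             longest = right - left
--             if longest < dist:
--                 left = fst
--                 right = i
--     return (left, right)
-- ===== SOURCE B (Python) =====
-- def find_longest_match(deltas):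
--     # One entry per distinct value: its first and last occurrence index.
--     # Value 0 gets a virtual first occurrence at index -1 (empty prefix).
--     occ = {0: (-1, -1)}
--     for i, v in enumerate(deltas):
--         if v in occ:
--             occ[v] = (occ[v][0], i)
--         else:
--             occ[v] = (i, i)
--     best = (0, 0)
--     for first, last in occ.values():
--         if last - first > best[1] - best[0]:
--             best = (first, last)
--     return best
-- ===== Notes on version B (the rewrite author's own statement) =====
-- stated objective: alternative
-- what changed: Replaces A's single greedy index scan (best window updated while the first-occurrence dict is being built) by a per-value aggregation: one pass records each distinct value's first and last occurrence index, then a separate selection scan over the dict's entries picks the widest (first, last) window.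
import Mathlib
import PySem

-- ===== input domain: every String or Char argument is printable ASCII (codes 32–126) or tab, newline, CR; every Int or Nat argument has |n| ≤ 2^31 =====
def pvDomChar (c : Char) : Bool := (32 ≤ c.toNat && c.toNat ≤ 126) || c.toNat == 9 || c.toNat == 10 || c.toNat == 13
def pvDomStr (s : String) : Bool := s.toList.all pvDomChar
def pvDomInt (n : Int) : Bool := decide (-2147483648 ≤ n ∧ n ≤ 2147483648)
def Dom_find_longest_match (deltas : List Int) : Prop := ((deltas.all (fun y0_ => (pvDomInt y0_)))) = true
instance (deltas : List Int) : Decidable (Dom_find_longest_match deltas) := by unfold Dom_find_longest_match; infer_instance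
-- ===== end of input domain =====

-- B replaces A's single greedy index scan (best tracked while the first-occurrence dict grows) by a
-- per-value aggregation: one pass builds first/last occurrence per distinct value, then a selection
-- scan over the dict's values (objective: alternative decomposition, same O(n) cost).

-- ===== PORT A =====
def find_longest_match (deltas : List Int) : Int × Int :=
  ((PySem.List.pyRange 0 (deltas.length : Int) 1).foldl
    (fun st i =>
      let v := PySem.List.pyGetD deltas i 0
      if st.1.contains v = false then
        (st.1.insert v i, st.2)
      else
        let fst := st.1.getD v 0
        let dist := i - fst
        let longest := st.2.2 - st.2.1
        if longest < dist then (st.1, (fst, i)) else st)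
    (PySem.Dict.ofList [((0:Int), (-1:Int))], ((0:Int), (0:Int)))).2

-- ===== PORT B =====
def find_longest_match_alt (deltas : List Int) : Int × Int :=
  let occ := (PySem.List.enumerate deltas 0).foldl
    (fun d p =>
      if d.contains p.2 then
        -- occ[v] = (occ[v][0], i); the getD default is never used (key present)
        d.insert p.2 ((d.getD p.2 ((0:Int), (0:Int))).1, p.1)
      else d.insert p.2 (p.1, p.1))
    (PySem.Dict.ofList [((0:Int), ((-1:Int), (-1:Int)))])
  occ.values.foldl
    (fun best fl => if best.2 - best.1 < fl.2 - fl.1 then fl else best)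
    ((0:Int), (0:Int))

-- ===== PRECONDITION & SPEC =====
def Spec_find_longest_match (deltas : List Int) (out : Int × Int) : Prop := out = find_longest_match_alt deltas
instance (deltas : List Int) (out : Int × Int) : Decidable (Spec_find_longest_match deltas out) := by unfold Spec_find_longest_match; infer_instance

-- ===== CLAIM (what is proved, stated in full; the proofs are below) =====
def Claim_equal_find_longest_match : Prop := ∀ (deltas : List Int), Dom_find_longest_match deltas → Spec_find_longest_match deltas (find_longest_match deltas)

-- ===== LEMMAS AND PROOFS =====

def pvM (a b : Int × Int) : Int × Int := if a.2 - a.1 < b.2 - b.1 then b else a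
def pvLt (a b : Int × Int) : Bool := decide (a.2 - a.1 < b.2 - b.1 ∨ (a.2 - a.1 = b.2 - b.1 ∧ b.2 < a.2))
def pvL (a b : Int × Int) : Int × Int := if pvLt a b then b else a

lemma pvDrop (cs : List (Int × Int)) (a : Int × Int) (ha : 0 ≤ a.2 - a.1) :
    cs.foldl pvM a = (cs.filter (fun p => decide (0 < p.2 - p.1))).foldl pvM a := by
  induction cs generalizing a with
  | nil => rfl
  | cons p cs ih =>
    by_cases h : 0 < p.2 - p.1
    · simp only [List.filter_cons, h, decide_true, List.foldl_cons]
      apply ih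
      simp only [pvM]; split_ifs with h2 <;> omega
    · simp only [List.filter_cons, h, decide_false, List.foldl_cons]
      have : pvM a p = a := by simp only [pvM]; split_ifs with h2 <;> [omega; rfl]
      rw [this]; exact ih a ha

lemma pvM_eq_L (cs : List (Int × Int)) (a : Int × Int)
    (hp : cs.Pairwise (fun p q => p.2 - p.1 = q.2 - q.1 → p.2 < q.2))
    (hd : ∀ p ∈ cs, 0 < p.2 - p.1)
    (ha : a = (0, 0) ∨ ∀ p ∈ cs, a.2 - a.1 = p.2 - p.1 → a.2 < p.2) :
    cs.foldl pvM a = cs.foldl pvL a := by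
  induction cs generalizing a with
  | nil => rfl
  | cons p cs ih =>
    rw [List.pairwise_cons] at hp
    have hdp : 0 < p.2 - p.1 := hd p (by simp)
    have hno : ¬(a.2 - a.1 = p.2 - p.1 ∧ p.2 < a.2) := by
      rcases ha with rfl | ha
      · rintro ⟨he, _⟩; simp at he; omega
      · rintro ⟨he, hl⟩; have := ha p (by simp) he; omega
    have hstep : pvM a p = pvL a p := by
      simp only [pvM, pvL, pvLt]
      by_cases h1 : a.2 - a.1 < p.2 - p.1
      · simp [h1]
      · simp [h1, hno]
    rw [List.foldl_cons, List.foldl_cons, hstep]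
    refine ih _ hp.2 (fun q hq => hd q (List.mem_cons_of_mem _ hq)) ?_
    by_cases hc : pvLt a p = true
    · have h : pvL a p = p := by simp only [pvL]; rw [hc]; rfl
      rw [h]; right; exact fun q hq => hp.1 q hq
    · have h : pvL a p = a := by
        simp only [pvL]; rw [Bool.not_eq_true] at hc; rw [hc]; rfl
      rw [h]
      rcases ha with rfl | ha
      · exfalso; apply hc; simp only [pvLt, decide_eq_true_eq]; left; simpa using hdp
      · right; exact fun q hq => ha q (by simp [hq])

lemma pvL_mem (cs : List (Int × Int)) (a : Int × Int) : cs.foldl pvL a ∈ a :: cs := by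
  induction cs generalizing a with
  | nil => simp
  | cons p cs ih =>
    rw [List.foldl_cons]
    have := ih (pvL a p)
    have hMp : pvL a p = a ∨ pvL a p = p := by simp only [pvL]; split_ifs <;> simp
    rcases List.mem_cons.1 this with h | h
    · rw [h]; rcases hMp with h' | h' <;> simp [h']
    · simp [List.mem_cons.2 (Or.inr (List.mem_cons.2 (Or.inr h)))]

lemma pvLt_trans_neg {a b c : Int × Int} (h1 : pvLt a b = false) (h2 : pvLt b c = false) :
    pvLt a c = false := by
  simp only [pvLt, decide_eq_false_iff_not] at *
  omega

lemma pvL_not_lt (a b : Int × Int) : pvLt (pvL a b) a = false ∧ pvLt (pvL a b) b = false := by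
  simp only [pvL, pvLt]
  split_ifs with h <;> simp only [decide_eq_false_iff_not] <;> constructor <;>
    simp only [decide_eq_true_eq] at h <;> omega

lemma pvL_max (cs : List (Int × Int)) (a : Int × Int) :
    ∀ x ∈ a :: cs, pvLt (cs.foldl pvL a) x = false := by
  induction cs generalizing a with
  | nil =>
    intro x hx; simp at hx; subst hx
    simp [pvLt]
  | cons p cs ih =>
    intro x hx
    rw [List.foldl_cons]
    have H := ih (pvL a p)
    rcases List.mem_cons.1 hx with rfl | hx2
    · exact pvLt_trans_neg (H (pvL x p) (by simp)) (pvL_not_lt x p).1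
    rcases List.mem_cons.1 hx2 with rfl | hx3
    · exact pvLt_trans_neg (H (pvL a x) (by simp)) (pvL_not_lt a x).2
    · exact H x (by simp [hx3])

lemma pvL_uniq {l : List (Int × Int)} {m m' : Int × Int}
    (hm : m ∈ l) (hm' : m' ∈ l)
    (h1 : ∀ x ∈ l, pvLt m x = false) (h2 : ∀ x ∈ l, pvLt m' x = false) : m = m' := by
  have a1 := h1 m' hm'
  have a2 := h2 m hm
  simp only [pvLt, decide_eq_false_iff_not] at a1 a2
  have : m.1 = m'.1 ∧ m.2 = m'.2 := by omega
  exact Prod.ext this.1 this.2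

def pvF (ds : List Int) (v : Int) : Int :=
  if v = 0 then -1
  else ((((PySem.List.enumerate ds 0).find? (fun p => p.2 == v)).map (·.1)).getD 0)
def pvLst (ds : List Int) (v : Int) : Int :=
  ((((PySem.List.enumerate ds 0).reverse.find? (fun p => p.2 == v)).map (·.1)).getD (pvF ds v))
def pvKeys (ds : List Int) : List Int := PySem.Set.update [0] ds
def pvCsB (ds : List Int) : List (Int × Int) := (pvKeys ds).map (fun v => (pvF ds v, pvLst ds v))

def pvStepB (d : PySem.Dict Int (Int × Int)) (p : Int × Int) : PySem.Dict Int (Int × Int) :=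
  if d.contains p.2 then
    d.insert p.2 ((d.getD p.2 ((0:Int), (0:Int))).1, p.1)
  else d.insert p.2 (p.1, p.1)

-- membership of a value in ds gives a find? hit on the enumerate list
lemma pvFind_isSome {ds : List Int} {v : Int} (hv : v ∈ ds) :
    ((PySem.List.enumerate ds 0).find? (fun p => p.2 == v)).isSome := by
  rw [List.find?_isSome]
  have : v ∈ (PySem.List.enumerate ds 0).map (·.2) := by
    rw [PySem.List.map_snd_enumerate]; exact hv
  rcases List.mem_map.1 this with ⟨q, hq, hq2⟩
  exact ⟨q, hq, by simp [hq2]⟩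

lemma pvFind_none {ds : List Int} {v : Int} (hv : v ∉ ds) :
    ((PySem.List.enumerate ds 0).find? (fun p => p.2 == v)) = none := by
  rw [List.find?_eq_none]
  intro q hq
  have : q.2 ∈ (PySem.List.enumerate ds 0).map (·.2) := List.mem_map_of_mem hq
  rw [PySem.List.map_snd_enumerate] at this
  simp only [beq_iff_eq]
  exact fun h => hv (h ▸ this)

lemma pvE_append (ds : List Int) (x : Int) :
    PySem.List.enumerate (ds ++ [x]) 0
      = PySem.List.enumerate ds 0 ++ [((ds.length : Int), x)] := by
  rw [PySem.List.enumerate_append]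
  simp [PySem.List.enumerate_cons]

lemma pvF_append_mem {ds : List Int} {v : Int} (x : Int) (hv : v ∈ ds ∨ v = 0) :
    pvF (ds ++ [x]) v = pvF ds v := by
  rcases eq_or_ne v 0 with rfl | h0
  · simp [pvF]
  · rcases hv with hv | rfl
    · simp only [pvF, if_neg h0, pvE_append]
      rw [List.find?_append]
      rcases Option.isSome_iff_exists.1 (pvFind_isSome hv) with ⟨q, hq⟩
      simp [hq]
    · exact absurd rfl h0

lemma pvF_append_new {ds : List Int} {x : Int} (hx : x ∉ ds) (h0 : x ≠ 0) :
    pvF (ds ++ [x]) x = (ds.length : Int) := by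
  simp only [pvF, if_neg h0, pvE_append]
  rw [List.find?_append, pvFind_none hx]
  simp

lemma pvLst_append_self (ds : List Int) (x : Int) :
    pvLst (ds ++ [x]) x = (ds.length : Int) := by
  simp only [pvLst, pvE_append, List.reverse_append]
  simp

lemma pvLst_append_ne {ds : List Int} {v x : Int} (hne : v ≠ x) (hv : v ∈ ds ∨ v = 0) :
    pvLst (ds ++ [x]) v = pvLst ds v := by
  simp only [pvLst, pvE_append, List.reverse_append]
  have hb : (x == v) = false := by simp [hne.symm]
  simp only [List.reverse_cons, List.reverse_nil, List.nil_append, List.singleton_append,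
    List.find?_cons, hb]
  rw [pvF_append_mem x hv]

lemma pvKeys_append (ds : List Int) (x : Int) :
    pvKeys (ds ++ [x]) = PySem.Set.add (pvKeys ds) x := by
  simp [pvKeys, PySem.Set.update_append, PySem.Set.update_cons, PySem.Set.update_nil]

lemma pvKeys_nodup (ds : List Int) : (pvKeys ds).Nodup :=
  PySem.Set.nodup_update _ _ (List.nodup_singleton 0)

lemma pvMem_keys {ds : List Int} {v : Int} :
    v ∈ pvKeys ds ↔ v = 0 ∨ v ∈ ds := by
  simp [pvKeys, PySem.Set.mem_update]

lemma pvOcc_items (ds : List Int) :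
    ((PySem.List.enumerate ds 0).foldl pvStepB
        (PySem.Dict.ofList [((0:Int), ((-1:Int), (-1:Int)))])).items
      = (pvKeys ds).map (fun v => (v, (pvF ds v, pvLst ds v))) := by
  induction ds using List.reverseRecOn with
  | nil => rfl
  | append_singleton ds x ih =>
    rw [pvE_append, List.foldl_append, List.foldl_cons, List.foldl_nil]
    set d := (PySem.List.enumerate ds 0).foldl pvStepB
        (PySem.Dict.ofList [((0:Int), ((-1:Int), (-1:Int)))]) with hd
    have hkeys : d.keys = pvKeys ds := by
      show d.items.map (·.1) = _
      rw [ih, List.map_map]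
      have h : ((·.1) ∘ fun v : Int => (v, (pvF ds v, pvLst ds v))) = id := rfl
      rw [h, List.map_id]
    have hnd : d.keys.Nodup := by rw [hkeys]; exact pvKeys_nodup ds
    by_cases hc : x ∈ pvKeys ds
    · -- existing key: entry replaced in place
      have hcont : d.contains x = true := by
        rw [PySem.Dict.contains_eq_decide_mem_keys, hkeys]; simp [hc]
      have hmem : (x, (pvF ds x, pvLst ds x)) ∈ d.items := by
        rw [ih]; exact List.mem_map_of_mem hc
      have hget : d.getD x ((0:Int),(0:Int)) = (pvF ds x, pvLst ds x) :=
        PySem.Dict.getD_of_mem_items d hmem hnd _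
      simp only [pvStepB, hcont, if_true, hget]
      rw [PySem.Dict.items_insert_of_contains d _ hcont, ih]
      rw [pvKeys_append, PySem.Set.add_of_mem hc, List.map_map]
      apply List.map_congr_left
      intro v hv
      have hv' : v = 0 ∨ v ∈ ds := pvMem_keys.1 hv
      by_cases hvx : v = x
      · subst hvx
        simp only [Function.comp_apply, beq_self_eq_true, if_true]
        rw [pvF_append_mem v hv'.symm, pvLst_append_self]
      · have hb : (v == x) = false := by simp [hvx]
        simp only [Function.comp_apply, hb, Bool.false_eq_true, if_false]
        rw [pvF_append_mem x hv'.symm, pvLst_append_ne hvx hv'.symm]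
    · -- fresh key: entry appended
      have hcont : d.contains x = false := by
        rw [PySem.Dict.contains_eq_decide_mem_keys, hkeys]; simp [hc]
      have hx0 : x ≠ 0 := fun h => hc (pvMem_keys.2 (Or.inl h))
      have hxds : x ∉ ds := fun h => hc (pvMem_keys.2 (Or.inr h))
      simp only [pvStepB, hcont, Bool.false_eq_true, if_false]
      rw [PySem.Dict.items_insert_of_not_contains d _ hcont, ih]
      rw [pvKeys_append, PySem.Set.add_of_not_mem hc, List.map_append]
      congr 1
      · apply List.map_congr_left
        intro v hv
        have hv' : v = 0 ∨ v ∈ ds := pvMem_keys.1 hv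
        have hvx : v ≠ x := fun h => hc (h ▸ hv)
        rw [pvF_append_mem x hv'.symm, pvLst_append_ne hvx hv'.symm]
      · simp only [List.map_cons, List.map_nil]
        rw [pvF_append_new hxds hx0, pvLst_append_self]

lemma pvB_eq (ds : List Int) : find_longest_match_alt ds = (pvCsB ds).foldl pvM (0, 0) := by
  show ((PySem.List.enumerate ds 0).foldl pvStepB
      (PySem.Dict.ofList [((0:Int), ((-1:Int), (-1:Int)))])).values.foldl pvM (0, 0) = _
  show (((PySem.List.enumerate ds 0).foldl pvStepB
      (PySem.Dict.ofList [((0:Int), ((-1:Int), (-1:Int)))])).items.map (·.2)).foldl pvM (0, 0) = _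
  rw [pvOcc_items, List.map_map]
  rfl

def pvCsA (ds : List Int) : List (Int × Int) :=
  ((PySem.List.enumerate ds 0).filter (fun p => decide (pvF ds p.2 < p.1))).map
    (fun p => (pvF ds p.2, p.1))

def pvStepA (st : PySem.Dict Int Int × (Int × Int)) (p : Int × Int) :
    PySem.Dict Int Int × (Int × Int) :=
  if st.1.contains p.2 = false then (st.1.insert p.2 p.1, st.2)
  else if st.2.2 - st.2.1 < p.1 - st.1.getD p.2 0 then (st.1, (st.1.getD p.2 0, p.1)) else st

def pvMA (l : List (Int × Int)) : PySem.Dict Int Int :=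
  l.foldl (fun m p => if m.contains p.2 = false then m.insert p.2 p.1 else m)
    (PySem.Dict.ofList [((0:Int), (-1:Int))])

lemma pvA_fold (ds : List Int) :
    find_longest_match ds = ((PySem.List.enumerate ds 0).foldl pvStepA
      (PySem.Dict.ofList [((0:Int), (-1:Int))], ((0:Int), (0:Int)))).2 := by
  rw [PySem.List.enumerate_eq_map_pyRange ds 0, List.foldl_map]
  rfl

lemma pvMA_get? (l : List (Int × Int)) (v : Int) :
    (pvMA l).get? v = if v = 0 then some (-1) else (l.find? (fun p => p.2 == v)).map (·.1) := by
  induction l using List.reverseRecOn with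
  | nil =>
    rw [show pvMA [] = PySem.Dict.mk [((0:Int), (-1:Int))] from rfl, PySem.Dict.get?_mk_cons]
    by_cases h : v = 0
    · simp [h]
    · have : ((0:Int) == v) = false := by simp [Ne.symm h]
      rw [this, if_neg h]; rfl
  | append_singleton l q ih =>
    have hstep : pvMA (l ++ [q])
        = (if (pvMA l).contains q.2 = false then (pvMA l).insert q.2 q.1 else pvMA l) := by
      rw [pvMA, List.foldl_append]; rfl
    rw [hstep, List.find?_append]
    by_cases hc : (pvMA l).contains q.2 = false
    · rw [if_pos hc]
      have hget : (pvMA l).get? q.2 = none := by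
        rw [PySem.Dict.contains_eq_isSome_get?] at hc
        exact Option.not_isSome_iff_eq_none.1 (by simp [hc])
      by_cases hqv : q.2 = v
      · subst hqv
        have hv0 : q.2 ≠ 0 := by
          intro h0
          rw [ih, if_pos h0] at hget; simp at hget
        rw [PySem.Dict.get?_insert_self, if_neg hv0]
        have hfl : l.find? (fun p => p.2 == q.2) = none := by
          rw [ih, if_neg hv0] at hget
          exact Option.map_eq_none_iff.1 hget
        rw [hfl]
        simp [List.find?]
      · rw [PySem.Dict.get?_insert_of_ne _ _ (fun h => hqv h.symm), ih]
        have hb : (q.2 == v) = false := by simp [hqv]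
        have hq1 : List.find? (fun p => p.2 == v) [q] = none := by simp [List.find?, hb]
        rw [hq1]
        by_cases hv : v = 0 <;> simp [hv]
    · rw [if_neg hc, ih]
      by_cases hv : v = 0
      · simp [hv]
      · rw [if_neg hv, if_neg hv]
        by_cases hqv : q.2 = v
        · have hc' : (pvMA l).contains q.2 = true := by simpa using hc
          rw [PySem.Dict.contains_eq_isSome_get?, hqv, ih, if_neg hv] at hc'
          have hfs : (List.find? (fun p => p.2 == v) l).isSome := by simpa using hc'
          rcases Option.isSome_iff_exists.1 hfs with ⟨r, hr⟩
          rw [hr, Option.some_or]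
        · have hb : (q.2 == v) = false := by simp [hqv]
          have hq1 : List.find? (fun p => p.2 == v) [q] = none := by simp [List.find?, hb]
          rw [hq1, Option.or_none]

lemma pvFoldGuard {α β : Type} (l : List α) (q : α → Bool) (h : α → β) (f : β → β → β) (a : β) :
    l.foldl (fun b x => if q x then f b (h x) else b) a = ((l.filter q).map h).foldl f a := by
  induction l generalizing a with
  | nil => rfl
  | cons x l ih =>
    by_cases hx : q x
    · simp only [List.foldl_cons, List.filter_cons, hx, if_true, List.map_cons, List.foldl_cons]
      exact ih (f a (h x))
    · simp only [List.foldl_cons, List.filter_cons, hx, Bool.false_eq_true, if_false]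
      exact ih a

lemma pvGetD_eq_get? (d : PySem.Dict Int Int) (k dflt : Int) :
    d.getD k dflt = (d.get? k).getD dflt := rfl

lemma pvMA_append (l : List (Int × Int)) (p : Int × Int) :
    pvMA (l ++ [p])
      = if (pvMA l).contains p.2 = false then (pvMA l).insert p.2 p.1 else pvMA l := by
  rw [pvMA, List.foldl_append]; rfl

lemma pvSplit (ds : List Int) (l₁ l₂ : List (Int × Int)) (i v : Int)
    (hE : PySem.List.enumerate ds 0 = l₁ ++ (i, v) :: l₂) :
    ((pvMA l₁).contains v = true → pvF ds v < i ∧ (pvMA l₁).getD v 0 = pvF ds v)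
    ∧ ((pvMA l₁).contains v = false → ¬(pvF ds v < i)) := by
  have hmem : (i, v) ∈ PySem.List.enumerate ds 0 := by
    rw [hE]; exact List.mem_append_right _ (List.mem_cons_self)
  have hi0 : 0 ≤ i := by
    rcases (PySem.List.mem_enumerate_iff ds 0 (i, v)).1 hmem with ⟨k, hk, hp⟩
    have : i = 0 + (k : Int) := congrArg Prod.fst hp
    omega
  have hpw : ∀ a ∈ l₁, a.1 < i := by
    have := PySem.List.pairwise_lt_enumerate ds 0
    rw [hE, List.pairwise_append] at this
    intro a ha
    exact this.2.2 a ha (i, v) List.mem_cons_self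
  have hfE : (PySem.List.enumerate ds 0).find? (fun p => p.2 == v)
      = (l₁.find? (fun p => p.2 == v)).or (some (i, v)) := by
    rw [hE, List.find?_append, List.find?_cons]
    have : ((i, v).2 == v) = true := by simp
    rw [this]
  by_cases hv : v = 0
  · subst hv
    have hg : (pvMA l₁).get? 0 = some (-1) := by rw [pvMA_get?]; simp
    constructor
    · intro _
      constructor
      · have hF0 : pvF ds 0 = -1 := by simp [pvF]
        omega
      · rw [pvGetD_eq_get?, hg]; simp [pvF]
    · intro hc
      rw [PySem.Dict.contains_eq_isSome_get?, hg] at hc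
      simp at hc
  · have hg : (pvMA l₁).get? v = (l₁.find? (fun p => p.2 == v)).map (·.1) := by
      rw [pvMA_get?, if_neg hv]
    have hpvF : pvF ds v = (((l₁.find? (fun p => p.2 == v)).or (some (i, v))).map (·.1)).getD 0 := by
      rw [pvF, if_neg hv, hfE]
    constructor
    · intro hc
      rw [PySem.Dict.contains_eq_isSome_get?, hg] at hc
      have : (l₁.find? (fun p => p.2 == v)).isSome := by simpa using hc
      rcases Option.isSome_iff_exists.1 this with ⟨r, hr⟩
      have hri : r.1 < i := hpw r (List.mem_of_find?_eq_some hr)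
      rw [hpvF, hr]
      constructor
      · simpa using hri
      · rw [pvGetD_eq_get?, hg, hr]; rfl
    · intro hc
      rw [PySem.Dict.contains_eq_isSome_get?, hg] at hc
      have : l₁.find? (fun p => p.2 == v) = none := by
        rcases h : l₁.find? (fun p => p.2 == v) with _ | r
        · exact h
        · rw [h] at hc; simp at hc
      rw [hpvF, this]
      simp

lemma pvA_char (ds : List Int) (l₂ : List (Int × Int)) : ∀ (l₁ : List (Int × Int)) (lr : Int × Int),
    PySem.List.enumerate ds 0 = l₁ ++ l₂ →
    (l₂.foldl pvStepA (pvMA l₁, lr)).2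
      = l₂.foldl (fun acc p =>
          if decide (pvF ds p.2 < p.1) then pvM acc (pvF ds p.2, p.1) else acc) lr := by
  induction l₂ with
  | nil => intro l₁ lr _; rfl
  | cons p l₂ ih =>
    intro l₁ lr hE
    obtain ⟨i, v⟩ := p
    have hE' : PySem.List.enumerate ds 0 = (l₁ ++ [(i, v)]) ++ l₂ := by
      rw [hE, List.append_assoc]; rfl
    rw [List.foldl_cons, List.foldl_cons]
    by_cases hc : (pvMA l₁).contains v = false
    · have h2 := (pvSplit ds l₁ l₂ i v hE).2 hc
      have hstep : pvStepA (pvMA l₁, lr) (i, v) = (pvMA (l₁ ++ [(i, v)]), lr) := by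
        simp only [pvStepA]
        rw [if_pos hc, pvMA_append, if_pos hc]
      rw [hstep, if_neg (by simpa using h2)]
      exact ih (l₁ ++ [(i, v)]) lr hE'
    · have hc' : (pvMA l₁).contains v = true := by simpa using hc
      obtain ⟨hlt, hgd⟩ := (pvSplit ds l₁ l₂ i v hE).1 hc'
      have hMA : pvMA (l₁ ++ [(i, v)]) = pvMA l₁ := by
        rw [pvMA_append, if_neg (by simp [hc'])]
      have hstep : pvStepA (pvMA l₁, lr) (i, v) = (pvMA l₁, pvM lr (pvF ds v, i)) := by
        simp only [pvStepA]
        rw [if_neg (by simp [hc']), hgd]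
        simp only [pvM]
        by_cases hlt2 : lr.2 - lr.1 < i - pvF ds v
        · rw [if_pos hlt2, if_pos (by simpa using hlt2)]
        · rw [if_neg hlt2, if_neg (by simpa using hlt2)]
      rw [hstep, if_pos (by simpa using hlt), ← hMA]
      exact ih (l₁ ++ [(i, v)]) (pvM lr (pvF ds v, i)) hE'

lemma pvA_eq (ds : List Int) : find_longest_match ds = (pvCsA ds).foldl pvM (0, 0) := by
  rw [pvA_fold]
  have h0 : PySem.Dict.ofList [((0:Int), (-1:Int))] = pvMA [] := rfl
  rw [h0, pvA_char ds (PySem.List.enumerate ds 0) [] ((0:Int), (0:Int)) rfl]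
  rw [pvFoldGuard]
  rfl


def pvCsB' (ds : List Int) : List (Int × Int) :=
  (pvCsB ds).filter (fun p => decide (0 < p.2 - p.1))

lemma pvCsA_pairwise (ds : List Int) : (pvCsA ds).Pairwise (fun p q => p.2 < q.2) :=
  List.Pairwise.map _ (fun _ _ h => h) ((PySem.List.pairwise_lt_enumerate ds 0).filter _)

lemma pvCsA_dist (ds : List Int) : ∀ x ∈ pvCsA ds, 0 < x.2 - x.1 := by
  intro x hx
  rcases List.mem_map.1 hx with ⟨p, hp, rfl⟩
  have h := (List.mem_filter.1 hp).2
  simp only [decide_eq_true_eq] at h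
  simp only []
  omega

lemma pvF_lt_len (ds : List Int) : ∀ v ∈ pvKeys ds, pvF ds v < (ds.length : Int) := by
  intro v hv
  by_cases h0 : v = 0
  · subst h0
    have : pvF ds 0 = -1 := by simp [pvF]
    rw [this]; omega
  · have hvd : v ∈ ds := (pvMem_keys.1 hv).resolve_left h0
    rcases Option.isSome_iff_exists.1 (pvFind_isSome hvd) with ⟨r, hr⟩
    have hrE := List.mem_of_find?_eq_some hr
    rcases (PySem.List.mem_enumerate_iff ds 0 r).1 hrE with ⟨k, hk, hp⟩
    have hr1 : r.1 = (k : Int) := by rw [hp]; simp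
    have hkl : (k : Int) < (ds.length : Int) := by exact_mod_cast hk
    rw [pvF, if_neg h0, hr]
    simpa [hr1] using hkl

lemma pvKeys_pairwise (ds : List Int) : (pvKeys ds).Pairwise (fun u v => pvF ds u < pvF ds v) := by
  induction ds using List.reverseRecOn with
  | nil =>
    rw [show pvKeys [] = [0] from rfl]
    exact List.pairwise_singleton _ _
  | append_singleton ds x ih =>
    rw [pvKeys_append]
    by_cases hc : x ∈ pvKeys ds
    · rw [PySem.Set.add_of_mem hc]
      refine List.Pairwise.imp_of_mem ?_ ih
      intro a b ha hb h
      rw [pvF_append_mem x (pvMem_keys.1 ha).symm, pvF_append_mem x (pvMem_keys.1 hb).symm]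
      exact h
    · have hx0 : x ≠ 0 := fun h => hc (pvMem_keys.2 (Or.inl h))
      have hxds : x ∉ ds := fun h => hc (pvMem_keys.2 (Or.inr h))
      rw [PySem.Set.add_of_not_mem hc, List.pairwise_append]
      refine ⟨List.Pairwise.imp_of_mem ?_ ih, List.pairwise_singleton _ _, ?_⟩
      · intro a b ha hb h
        rw [pvF_append_mem x (pvMem_keys.1 ha).symm, pvF_append_mem x (pvMem_keys.1 hb).symm]
        exact h
      · intro a ha b hb
        have hbx : b = x := by simpa using hb
        rw [hbx, pvF_append_mem x (pvMem_keys.1 ha).symm, pvF_append_new hxds hx0]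
        exact pvF_lt_len ds a ha

lemma pvCsB'_pairwise (ds : List Int) : (pvCsB' ds).Pairwise (fun p q => p.1 < q.1) := by
  have h : (pvCsB ds).Pairwise (fun p q => p.1 < q.1) := by
    unfold pvCsB
    exact List.Pairwise.map _ (fun a b h => h) (pvKeys_pairwise ds)
  exact h.filter _

lemma pvFind?_first {α : Type} {R : α → α → Prop} {l : List α} {pr : α → Bool} {q x : α}
    (hpw : l.Pairwise R) (hq : l.find? pr = some q) (hx : x ∈ l) (hpx : pr x = true) :
    q = x ∨ R q x := by
  induction l with
  | nil => cases hx
  | cons a l ih =>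
    rw [List.find?_cons] at hq
    rw [List.pairwise_cons] at hpw
    cases hpa : pr a with
    | true =>
      rw [hpa] at hq
      have hqa : q = a := by simpa using hq.symm
      subst hqa
      rcases List.mem_cons.1 hx with rfl | hx2
      · exact Or.inl rfl
      · exact Or.inr (hpw.1 x hx2)
    | false =>
      rw [hpa] at hq
      rcases List.mem_cons.1 hx with rfl | hx2
      · rw [hpx] at hpa; exact absurd hpa (by simp)
      · exact ih hpw.2 hq hx2

lemma pvLst_default {ds : List Int} {v : Int} (hv : v ∉ ds) : pvLst ds v = pvF ds v := by
  rw [pvLst]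
  have hn : (PySem.List.enumerate ds 0).reverse.find? (fun p => p.2 == v) = none := by
    rw [List.find?_eq_none]
    intro q hq
    rw [List.mem_reverse] at hq
    have hq2 : q.2 ∈ ds := by
      rw [← PySem.List.map_snd_enumerate ds 0]; exact List.mem_map_of_mem hq
    simp only [beq_iff_eq]
    exact fun h => hv (h ▸ hq2)
  rw [hn]
  rfl

lemma pvLst_spec {ds : List Int} {v : Int} (hv : v ∈ ds) :
    ∃ q ∈ PySem.List.enumerate ds 0, q.2 = v ∧ pvLst ds v = q.1 ∧
      ∀ p ∈ PySem.List.enumerate ds 0, p.2 = v → p.1 ≤ q.1 := by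
  have hvE : ∃ p ∈ (PySem.List.enumerate ds 0).reverse, ((fun p : Int × Int => p.2 == v) p) = true := by
    have : v ∈ (PySem.List.enumerate ds 0).map (·.2) := by
      rw [PySem.List.map_snd_enumerate]; exact hv
    rcases List.mem_map.1 this with ⟨q, hq, hq2⟩
    exact ⟨q, List.mem_reverse.2 hq, by simp [hq2]⟩
  have hs : ((PySem.List.enumerate ds 0).reverse.find? (fun p => p.2 == v)).isSome :=
    List.find?_isSome.2 hvE
  rcases Option.isSome_iff_exists.1 hs with ⟨q, hq⟩
  have hqmem : q ∈ PySem.List.enumerate ds 0 := List.mem_reverse.1 (List.mem_of_find?_eq_some hq)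
  have hq2 : q.2 = v := by have := List.find?_some hq; simpa using this
  have hlst : pvLst ds v = q.1 := by rw [pvLst, hq]; rfl
  refine ⟨q, hqmem, hq2, hlst, ?_⟩
  intro p hp hp2
  have hpw : ((PySem.List.enumerate ds 0).reverse).Pairwise (fun a b => b.1 ≤ a.1) := by
    rw [List.pairwise_reverse]
    exact (PySem.List.pairwise_lt_enumerate ds 0).imp (fun h => le_of_lt h)
  rcases pvFind?_first hpw hq (List.mem_reverse.2 hp) (by simp [hp2]) with h | h
  · rw [h]
  · exact h

lemma pvM1 (ds : List Int) : ∀ y ∈ pvCsB' ds, y ∈ pvCsA ds := by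
  intro y hy
  have h1 : y ∈ pvCsB ds := (List.mem_filter.1 hy).1
  have hd : 0 < y.2 - y.1 := by
    have := (List.mem_filter.1 hy).2; simpa using this
  rcases List.mem_map.1 h1 with ⟨v, hvk, rfl⟩
  simp only [] at hd
  have hvds : v ∈ ds := by
    by_contra hvn
    rw [pvLst_default hvn] at hd
    omega
  rcases pvLst_spec hvds with ⟨q, hqE, hq2, hlst, _⟩
  apply List.mem_map.2
  have hql : pvF ds v < q.1 := by rw [hlst] at hd; omega
  refine ⟨q, List.mem_filter.2 ⟨hqE, ?_⟩, ?_⟩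
  · simp only [hq2, decide_eq_true_eq]; exact hql
  · rw [hq2, hlst]

lemma pvM2 (ds : List Int) : ∀ x ∈ pvCsA ds, ∃ y ∈ pvCsB' ds, x.1 = y.1 ∧ x.2 ≤ y.2 := by
  intro x hx
  rcases List.mem_map.1 hx with ⟨p, hpf, rfl⟩
  have hpE : p ∈ PySem.List.enumerate ds 0 := (List.mem_filter.1 hpf).1
  have hplt : pvF ds p.2 < p.1 := by
    have := (List.mem_filter.1 hpf).2; simpa using this
  have hvds : p.2 ∈ ds := by
    rw [← PySem.List.map_snd_enumerate ds 0]; exact List.mem_map_of_mem hpE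
  rcases pvLst_spec hvds with ⟨q, hqE, hq2, hlst, hmax⟩
  have hle : p.1 ≤ pvLst ds p.2 := by rw [hlst]; exact hmax p hpE rfl
  refine ⟨(pvF ds p.2, pvLst ds p.2), ?_, rfl, hle⟩
  apply List.mem_filter.2
  constructor
  · exact List.mem_map.2 ⟨p.2, pvMem_keys.2 (Or.inr hvds), rfl⟩
  · simp only [decide_eq_true_eq]
    omega

lemma pvLt_mono {s x y : Int × Int} (h1 : x.1 = y.1) (h2 : x.2 ≤ y.2)
    (h : pvLt s y = false) : pvLt s x = false := by
  simp only [pvLt, decide_eq_false_iff_not] at *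
  omega

-- ===== VERDICT (by name: the statement is the Claim_ definition above) =====
theorem find_longest_match_spec : Claim_equal_find_longest_match := by
  intro ds _
  show find_longest_match ds = find_longest_match_alt ds
  rw [pvA_eq, pvB_eq]
  have hA : (pvCsA ds).foldl pvM (0, 0) = (pvCsA ds).foldl pvL (0, 0) :=
    pvM_eq_L _ _ ((pvCsA_pairwise ds).imp (by intro p q h _; exact h)) (pvCsA_dist ds)
      (Or.inl rfl)
  have hB : (pvCsB ds).foldl pvM (0, 0) = (pvCsB' ds).foldl pvL (0, 0) := by
    rw [pvDrop _ _ (by norm_num)]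
    exact pvM_eq_L _ _ ((pvCsB'_pairwise ds).imp (by intro p q h hd; omega))
      (fun p hp => by have := (List.mem_filter.1 hp).2; simpa using this) (Or.inl rfl)
  rw [hA, hB]
  have hBd : ∀ p ∈ pvCsB' ds, 0 < p.2 - p.1 := fun p hp => by
    have := (List.mem_filter.1 hp).2; simpa using this
  -- both sides are the unique maximum of (0,0) :: pvCsA ds
  apply pvL_uniq (l := ((0, 0) : Int × Int) :: pvCsA ds)
  · exact pvL_mem _ _
  · have := pvL_mem (pvCsB' ds) (0, 0)
    rcases List.mem_cons.1 this with h | h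
    · rw [h]; exact List.mem_cons_self
    · exact List.mem_cons_of_mem _ (pvM1 ds _ h)
  · exact pvL_max _ _
  · intro x hx
    rcases List.mem_cons.1 hx with rfl | hx2
    · exact pvL_max (pvCsB' ds) (0, 0) _ List.mem_cons_self
    · rcases pvM2 ds x hx2 with ⟨y, hy, h1, h2⟩
      exact pvLt_mono h1 h2 (pvL_max (pvCsB' ds) (0, 0) y (List.mem_cons_of_mem _ hy))
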